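-- pv_equiv track=rewrite | github.com/yanmofeixi/Auto_Simulated_Universe | diver/scoring.py | score_curio
-- ===== SOURCE A (Python) =====
-- from typing import Dict, Iterable, Mapping, Optional
--
-- def score_curio(
--     text: str,
--     curio_prior: Mapping[str, int],
-- ) -> int:
--     """奇物打分.
--
--     Args:
--         text: 奇物文本.
--         curio_prior: 奇物关键词优先级表.
--
--     Returns:
--         奇物得分.
--     """
--     score = 0
--     for token, weight in curio_prior.items():
--         if token in text:
--             score += weight
--     return score
-- ===== SOURCE B (Python) =====
-- def score_curio(text, curio_prior):
--     # Window scan: slide every keyword length over the text once, collecting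
--     # which keywords actually occur, then sum their weights.
--     lengths = {len(t) for t in curio_prior}
--     found = set()
--     n = len(text)
--     for l in lengths:
--         for i in range(n - l + 1):
--             window = text[i:i + l]
--             if window in curio_prior:
--                 found.add(window)
--     return sum(w for t, w in curio_prior.items() if t in found)
-- ===== Notes on version B (the rewrite author's own statement) =====
-- stated objective: faster
-- what changed: Instead of running a separate substring search over the text for every keyword, B slides a window of each distinct keyword length over the text once, collects via hash lookup the set of windows that are keywords, and then sums the weights of the keywords found.
import Mathlib
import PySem

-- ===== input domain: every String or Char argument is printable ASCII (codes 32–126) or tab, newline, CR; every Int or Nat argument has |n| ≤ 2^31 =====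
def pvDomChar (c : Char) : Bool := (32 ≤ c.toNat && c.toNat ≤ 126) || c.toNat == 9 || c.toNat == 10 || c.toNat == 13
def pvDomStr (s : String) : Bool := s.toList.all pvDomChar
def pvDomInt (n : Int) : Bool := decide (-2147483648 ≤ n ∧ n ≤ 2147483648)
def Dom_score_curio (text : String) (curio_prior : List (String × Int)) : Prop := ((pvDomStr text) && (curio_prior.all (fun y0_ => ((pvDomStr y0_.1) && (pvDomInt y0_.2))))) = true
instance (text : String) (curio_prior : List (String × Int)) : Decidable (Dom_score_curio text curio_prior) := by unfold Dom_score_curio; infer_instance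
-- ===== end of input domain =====

-- B replaces the per-keyword substring search over the text by a window scan
-- (one sliding window per distinct keyword length, hash lookup of each window);
-- objective: faster (measurably so in a timing run).


-- ===== PORT A =====
-- literal port of A: iterate the dict's items, test `token in text`, accumulate
def score_curio (text : String) (curio_prior : List (String × Int)) : Int :=
  let d := PySem.Dict.ofList curio_prior
  d.items.foldl (fun score p => if PySem.Str.isIn p.1 text then score + p.2 else score) 0

-- ===== PORT B =====
-- literal port of B (Source B): distinct keyword lengths, window scan over text
-- collecting matched keywords into a set, then sum the weights of matched items
def score_curio_alt (text : String) (curio_prior : List (String × Int)) : Int :=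
  let d := PySem.Dict.ofList curio_prior
  let lengths : PySem.Set Int := PySem.Set.ofList (d.keys.map (fun t => PySem.Str.len t))
  let n : Int := PySem.Str.len text
  let found : PySem.Set String :=
    lengths.foldl (fun found l =>
      (PySem.List.pyRange 0 (n - l + 1) 1).foldl (fun found i =>
        let window := PySem.Str.slice text (some i) (some (i + l))
        if d.contains window then found.add window else found) found)
      PySem.Set.empty
  d.items.foldl (fun s p => if found.contains p.1 then s + p.2 else s) 0

-- ===== PRECONDITION & SPEC =====
def Spec_score_curio (text : String) (curio_prior : List (String × Int)) (out : Int) : Prop := out = score_curio_alt text curio_prior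
instance (text : String) (curio_prior : List (String × Int)) (out : Int) : Decidable (Spec_score_curio text curio_prior out) := by unfold Spec_score_curio; infer_instance

-- ===== CLAIM (what is proved, stated in full; the proofs are below) =====
def Claim_equal_score_curio : Prop := ∀ (text : String) (curio_prior : List (String × Int)), Dom_score_curio text curio_prior → Spec_score_curio text curio_prior (score_curio text curio_prior)

-- ===== LEMMAS AND PROOFS =====

-- membership after a fold whose step adds at most one element under a test
theorem mem_foldl_add_ite {α β : Type} [BEq β] [LawfulBEq β] (xs : List α)
    (p : α → Bool) (f : α → β) (acc : PySem.Set β) (w : β) :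
    w ∈ xs.foldl (fun s x => if p x then PySem.Set.add s (f x) else s) acc ↔
      w ∈ acc ∨ ∃ x ∈ xs, p x = true ∧ f x = w := by
  induction xs generalizing acc with
  | nil => simp
  | cons x xs ih =>
    simp only [List.foldl_cons, ih]
    by_cases h : p x = true
    · simp [h, PySem.Set.mem_add]
      constructor
      · rintro ((hw | rfl) | ⟨y, hy, hp, rfl⟩)
        · exact Or.inl hw
        · exact Or.inr (Or.inl rfl)
        · exact Or.inr (Or.inr ⟨y, hy, hp, rfl⟩)
      · rintro (hw | (rfl | ⟨y, hy, hp, rfl⟩))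
        · exact Or.inl (Or.inl hw)
        · exact Or.inl (Or.inr rfl)
        · exact Or.inr ⟨y, hy, hp, rfl⟩
    · simp only [h]
      constructor
      · rintro (hw | ⟨y, hy, hp, rfl⟩)
        · exact Or.inl hw
        · exact Or.inr ⟨y, List.mem_cons_of_mem _ hy, hp, rfl⟩
      · rintro (hw | ⟨y, hy, hp, rfl⟩)
        · exact Or.inl hw
        · rcases List.mem_cons.mp hy with rfl | hy
          · exact absurd hp h
          · exact Or.inr ⟨y, hy, hp, rfl⟩

-- membership after a fold whose step satisfies an "old ∨ new" characterisation
theorem mem_foldl_or {α β : Type} (xs : List α)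
    (g : PySem.Set β → α → PySem.Set β) (Q : α → β → Prop) (w : β)
    (h : ∀ s x, w ∈ g s x ↔ w ∈ s ∨ Q x w) (acc : PySem.Set β) :
    w ∈ xs.foldl g acc ↔ w ∈ acc ∨ ∃ x ∈ xs, Q x w := by
  induction xs generalizing acc with
  | nil => simp
  | cons x xs ih =>
    simp only [List.foldl_cons, ih, h]
    constructor
    · rintro ((hw | hq) | ⟨y, hy, hq⟩)
      · exact Or.inl hw
      · exact Or.inr ⟨x, List.mem_cons_self, hq⟩
      · exact Or.inr ⟨y, List.mem_cons_of_mem _ hy, hq⟩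
    · rintro (hw | ⟨y, hy, hq⟩)
      · exact Or.inl (Or.inl hw)
      · rcases List.mem_cons.mp hy with rfl | hy
        · exact Or.inl (Or.inr hq)
        · exact Or.inr ⟨y, hy, hq⟩

-- the window w = text[i:i+l] collected by B, as a list of characters
theorem toList_window (text : String) (i l : Int) (hi : 0 ≤ i) (hl : 0 ≤ l) :
    (PySem.Str.slice text (some i) (some (i + l))).toList =
      (text.toList.drop i.toNat).take l.toNat := by
  rw [PySem.Str.toList_slice, PySem.Chars.slice_eq_listSlice,
    PySem.List.slice_toNat _ hi (by omega)]
  congr 1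
  omega

-- core characterisation: for a key t of the dict, membership in B's `found`
-- set is exactly Python's `t in text`
theorem found_contains_eq (text : String) (d : PySem.Dict String Int) (t : String)
    (ht : t ∈ d.keys) :
    (((PySem.Set.ofList (d.keys.map (fun t => PySem.Str.len t))).foldl (fun found l =>
        (PySem.List.pyRange 0 (PySem.Str.len text - l + 1) 1).foldl (fun found i =>
          if d.contains (PySem.Str.slice text (some i) (some (i + l))) then
            found.add (PySem.Str.slice text (some i) (some (i + l))) else found) found)
      PySem.Set.empty) : PySem.Set String).contains t = PySem.Str.isIn t text := by
  have hmem : t ∈ ((PySem.Set.ofList (d.keys.map (fun t => PySem.Str.len t))).foldl (fun found l =>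
        (PySem.List.pyRange 0 (PySem.Str.len text - l + 1) 1).foldl (fun found i =>
          if d.contains (PySem.Str.slice text (some i) (some (i + l))) then
            found.add (PySem.Str.slice text (some i) (some (i + l))) else found) found)
      PySem.Set.empty : PySem.Set String) ↔
      ∃ l ∈ PySem.Set.ofList (d.keys.map (fun t => PySem.Str.len t)),
        ∃ i ∈ PySem.List.pyRange 0 (PySem.Str.len text - l + 1) 1,
          d.contains (PySem.Str.slice text (some i) (some (i + l))) = true ∧
            PySem.Str.slice text (some i) (some (i + l)) = t := by
    rw [mem_foldl_or _ _
      (fun l w => ∃ i ∈ PySem.List.pyRange 0 (PySem.Str.len text - l + 1) 1,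
          d.contains (PySem.Str.slice text (some i) (some (i + l))) = true ∧
            PySem.Str.slice text (some i) (some (i + l)) = w) t
      (fun s l => mem_foldl_add_ite _ _ _ s t)]
    simp [PySem.Set.empty]
  cases hin : PySem.Str.isIn t text with
  | false =>
    -- t not in text: t cannot be in found (every member of found is an infix of text)
    rw [Bool.eq_false_iff, Ne, PySem.Set.contains_iff, hmem]
    rintro ⟨l, hl, i, hi, _, heq⟩
    rw [PySem.Set.mem_ofList] at hl
    rcases List.mem_map.mp hl with ⟨u, _, rfl⟩
    rw [PySem.List.mem_pyRange_one] at hi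
    have hl0 : (0:Int) ≤ PySem.Str.len u := by rw [PySem.Str.len_eq]; positivity
    have hinf : t.toList <:+: text.toList := by
      rw [← heq, toList_window _ _ _ hi.1 hl0]
      exact ((text.toList.drop i.toNat).take_prefix _).isInfix.trans
        (text.toList.drop_suffix _).isInfix
    have := (PySem.Str.isIn_iff_infix t text).mpr hinf
    rw [hin] at this
    exact Bool.false_ne_true this
  | true =>
    -- t in text: exhibit the window at some occurrence of t
    rw [PySem.Set.contains_iff, hmem]
    have hdj : ∃ j : Nat, t.toList <+: text.toList.drop j := by
      rw [PySem.Chars.exists_prefix_drop_iff_isIn]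
      simpa using hin
    rcases hdj with ⟨j, hj⟩
    -- normalise j so that j + |t| ≤ |text|
    have hjlen : ∃ j : Nat, j + t.toList.length ≤ text.toList.length ∧
        t.toList <+: text.toList.drop j := by
      by_cases hle : j ≤ text.toList.length
      · exact ⟨j, by
          have := hj.length_le
          rw [List.length_drop] at this
          omega, hj⟩
      · refine ⟨0, ?_, ?_⟩ <;>
        · have h0 : text.toList.drop j = [] := List.drop_eq_nil_of_le (by omega)
          rw [h0] at hj
          have := List.prefix_nil.mp hj
          simp [this]
    rcases hjlen with ⟨k, hk, hpre⟩
    refine ⟨(t.toList.length : Int), ?_, (k : Int), ?_, ?_, ?_⟩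
    · rw [PySem.Set.mem_ofList]
      exact List.mem_map.mpr ⟨t, ht, by rw [PySem.Str.len_eq]⟩
    · rw [PySem.List.mem_pyRange_one, PySem.Str.len_eq]
      constructor
      · positivity
      · omega
    · rw [PySem.Dict.contains_iff_mem_keys]
      have hw : PySem.Str.slice text (some (k : Int)) (some ((k : Int) + t.toList.length)) = t := by
        rw [← String.toList_inj, toList_window _ _ _ (by positivity) (by positivity)]
        simp only [Int.toNat_natCast]
        exact ((List.prefix_iff_eq_take.mp hpre).symm)
      rw [hw]; exact ht
    · rw [← String.toList_inj, toList_window _ _ _ (by positivity) (by positivity)]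
      simp only [Int.toNat_natCast]
      exact ((List.prefix_iff_eq_take.mp hpre).symm)

-- ===== VERDICT (by name: the statement is the Claim_ definition above) =====
theorem score_curio_spec : Claim_equal_score_curio := by
  intro text curio_prior _
  unfold Spec_score_curio score_curio score_curio_alt
  simp only []
  apply PySem.List.foldl_congr_mem
  intro acc p hp
  have hkey : p.1 ∈ (PySem.Dict.ofList curio_prior).keys :=
    PySem.Dict.mem_keys_of_mem_items _ hp
  rw [found_contains_eq text (PySem.Dict.ofList curio_prior) p.1 hkey]
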